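-- pv_equiv track=rewrite | github.com/Hemant-1821/codevitaSolutions | 2016/LogicPyramid.py | element
-- ===== SOURCE A (Python) =====
-- def element(count):
--     first = 6
--     second = 28
--     if count == 1:
--         return first
--     elif count == 2:
--         return second
--     else:
--         count = count-2
--         for h in range(0,count):
--             next_ele = (second*2)-first+16
--             first = second
--             second = next_ele
--     return next_ele
-- ===== SOURCE B (Python) =====
-- def element(count):
--     # closed form of the recurrence a1=6, a2=28, a_{n+1}=2*a_n-a_{n-1}+16
--     if count < 1:
--         raise ValueError("count must be >= 1")
--     return 8 * count * count - 2 * count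
-- ===== Notes on version B (the rewrite author's own statement) =====
-- stated objective: faster
-- what changed: Replaced the linear loop that iterates the second-order recurrence by its closed-form quadratic polynomial in count.
import Mathlib
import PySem

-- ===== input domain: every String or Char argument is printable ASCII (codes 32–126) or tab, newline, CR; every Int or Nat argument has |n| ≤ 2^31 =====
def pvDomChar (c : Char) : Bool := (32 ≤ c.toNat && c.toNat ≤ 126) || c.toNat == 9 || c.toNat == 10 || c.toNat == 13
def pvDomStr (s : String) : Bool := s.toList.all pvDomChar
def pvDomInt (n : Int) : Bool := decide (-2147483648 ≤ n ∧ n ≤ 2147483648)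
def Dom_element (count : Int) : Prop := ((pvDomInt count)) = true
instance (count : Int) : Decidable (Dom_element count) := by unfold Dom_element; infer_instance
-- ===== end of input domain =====

-- ===== PORT A =====
-- B replaces A's linear recurrence loop by the closed-form quadratic polynomial (faster).
def element (count : Int) : Int :=
  if count = 1 then 6
  else if count = 2 then 28
  else
    let count2 := count - 2
    let st := (PySem.List.pyRange 0 count2 1).foldl
      (fun (st : Int × Int × Option Int) _ =>
        let next_ele := st.2.1 * 2 - st.1 + 16
        (st.2.1, next_ele, some next_ele))
      (6, 28, none)
    -- Python returns next_ele, unbound (UnboundLocalError) if the loop did not run: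
    -- that case (count <= 0) is excluded by Pre_element; .getD 0 is never the value used.
    st.2.2.getD 0

-- ===== PORT B =====
def element_alt (count : Int) : Int :=
  -- Source B raises ValueError for count < 1; that case is outside Pre_element (0 is never the value used)
  if count < 1 then 0
  else 8 * count * count - 2 * count

-- ===== PRECONDITION & SPEC =====
-- Pre_ excludes exactly count <= 0, where both A and B raise.
def Pre_element (count : Int) : Prop := 1 ≤ count
instance (count : Int) : Decidable (Pre_element count) := by unfold Pre_element; infer_instance
def pvWitness_element : Int := (5)
def Spec_element (count : Int) (out : Int) : Prop := out = element_alt count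
instance (count : Int) (out : Int) : Decidable (Spec_element count out) := by unfold Spec_element; infer_instance

-- ===== CLAIM (what is proved, stated in full; the proofs are below) =====
def Claim_equal_element : Prop := ∀ (count : Int), Dom_element count → Pre_element count → Spec_element count (element count)

-- ===== LEMMAS AND PROOFS =====
def pvStep (st : Int × Int × Option Int) (_ : Int) : Int × Int × Option Int :=
  let next_ele := st.2.1 * 2 - st.1 + 16
  (st.2.1, next_ele, some next_ele)

def pvG (k : Int) : Int := 8 * k * k - 2 * k

lemma pv_loop (n : Nat) :
    (PySem.List.pyRange 0 ((n : Int) + 1) 1).foldl pvStep (6, 28, none)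
      = (pvG ((n : Int) + 2), pvG ((n : Int) + 3), some (pvG ((n : Int) + 3))) := by
  induction n with
  | zero =>
      simp only [Nat.cast_zero, zero_add]
      rw [show PySem.List.pyRange 0 1 1 = [0] from by decide]
      simp [pvStep, pvG]
  | succ m ih =>
      have h : (PySem.List.pyRange 0 (((m : Int) + 1) + 1) 1)
          = PySem.List.pyRange 0 ((m : Int) + 1) 1 ++ [(m : Int) + 1] := by
        exact PySem.List.pyRange_one_succ_right (by positivity)
      push_cast
      rw [h, List.foldl_append, ih]
      simp only [List.foldl, pvStep, pvG, Prod.mk.injEq]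
      refine ⟨by ring, by ring, ?_⟩
      congr 1
      ring

-- ===== VERDICT =====
theorem element_spec : Claim_equal_element := by
  intro count _ hpre
  unfold Spec_element element element_alt
  have hnl : ¬ count < 1 := by unfold Pre_element at hpre; omega
  by_cases h1 : count = 1
  · simp [h1]
  by_cases h2 : count = 2
  · simp [h2]
  have h3 : 3 ≤ count := by
    unfold Pre_element at hpre; omega
  simp only [if_neg h1, if_neg h2, if_neg hnl]
  set n : Nat := (count - 3).toNat with hn
  have hc : count - 2 = (n : Int) + 1 := by omega
  have := pv_loop n
  show ((PySem.List.pyRange 0 (count - 2) 1).foldl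
      (fun (st : Int × Int × Option Int) _ =>
        (st.2.1, st.2.1 * 2 - st.1 + 16, some (st.2.1 * 2 - st.1 + 16)))
      (6, 28, none)).2.2.getD 0 = 8 * count * count - 2 * count
  have hstep : (fun (st : Int × Int × Option Int) (_ : Int) =>
      (st.2.1, st.2.1 * 2 - st.1 + 16, some (st.2.1 * 2 - st.1 + 16))) = pvStep := by
    funext st x; simp [pvStep]
  rw [hc, hstep, this]
  have hn3 : (n : Int) + 3 = count := by omega
  simp [pvG, hn3]
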